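-- pv_equiv track=rewrite | github.com/kurahara0418/project | kurahara/solver_func/make_tt_signed.py | gen_str
-- ===== SOURCE A (Python) =====
-- def gen_str(num,bit):
--     out = ""
--     cnt = 0
--     for i in range(bit-1,0,-1):
--         temp = num // (3**i)
--         if temp == 0:
--             out += "="
--             cnt += 1
--         elif temp == 1:
--             out += "u"
--         else:
--             out += "n"
--         num -= (3**i)*(temp)
--     if (num % 3) == 0:
--         out += "="
--         cnt += 1
--     elif (num % 3) == 1:
--         out += "u"
--     else:
--         out += "n"
--     return out,cnt
-- ===== SOURCE B (Python) =====
-- def gen_str(num, bit):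
--     # low-to-high base-3 digit extraction (one divmod per digit), then reverse;
--     # the top position keeps the unreduced quotient, as the task's encoding does.
--     sym = "=un"
--     rev = [sym[num % 3]]
--     if bit >= 2:
--         num //= 3
--         for _ in range(bit - 2):
--             rev.append(sym[num % 3])
--             num //= 3
--         rev.append("=" if num == 0 else "u" if num == 1 else "n")
--     out = "".join(reversed(rev))
--     return out, out.count("=")
-- ===== Notes on version B (the rewrite author's own statement) =====
-- stated objective: faster
-- what changed: Replaces the high-to-low loop that recomputes 3**i and subtracts 3**i*temp from the full number each round with a single low-to-high mod/div-by-3 extraction on a shrinking number, building the digit list in reverse and counting '=' once at the end.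
import Mathlib
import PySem

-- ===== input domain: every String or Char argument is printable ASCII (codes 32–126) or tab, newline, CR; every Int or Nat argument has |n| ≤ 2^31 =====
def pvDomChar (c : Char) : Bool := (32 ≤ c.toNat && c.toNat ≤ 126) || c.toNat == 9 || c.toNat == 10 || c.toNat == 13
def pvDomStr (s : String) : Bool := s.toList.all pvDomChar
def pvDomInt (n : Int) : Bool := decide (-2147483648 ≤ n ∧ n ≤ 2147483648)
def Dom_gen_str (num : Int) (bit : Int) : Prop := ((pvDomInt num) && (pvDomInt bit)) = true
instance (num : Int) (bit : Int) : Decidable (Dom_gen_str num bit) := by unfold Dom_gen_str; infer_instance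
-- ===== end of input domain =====

-- B replaces A's high-to-low loop (fresh 3**i power and full-width subtraction per digit) with one
-- low-to-high mod/div-by-3 extraction on a shrinking number, then reverses; objective: faster.

-- ===== PORT A =====
-- loop body of 'for i in range(bit-1, 0, -1)'
def pvStepA (st : String × Int × Int) (i : Int) : String × Int × Int :=
  let p : Int := 3 ^ i.toNat   -- 3**i; exact here: every i produced by range(bit-1, 0, -1) is ≥ 1
  let temp := PySem.Int.floordiv st.2.2 p
  let oc : String × Int :=
    if temp = 0 then (st.1 ++ "=", st.2.1 + 1)
    else if temp = 1 then (st.1 ++ "u", st.2.1)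
    else (st.1 ++ "n", st.2.1)
  (oc.1, oc.2, st.2.2 - p * temp)

def gen_str (num : Int) (bit : Int) : String × Int :=
  let st := (PySem.List.pyRange (bit - 1) 0 (-1)).foldl pvStepA ("", 0, num)
  let m := PySem.Int.mod st.2.2 3
  if m = 0 then (st.1 ++ "=", st.2.1 + 1)
  else if m = 1 then (st.1 ++ "u", st.2.1)
  else (st.1 ++ "n", st.2.1)

-- ===== PORT B =====
-- '"=un"[d]' for d ∈ {0,1,2} (an 'x % 3' with positive divisor), and the trailing conditional
-- expression '"=" if n == 0 else "u" if n == 1 else "n"' — the same selection.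
def pvSym (d : Int) : Char :=
  if d = 0 then '=' else if d = 1 then 'u' else 'n'

-- loop body of 'for _ in range(bit-2): rev.append(sym[num % 3]); num //= 3'
def pvStepB (st : List Char × Int) (_ : Nat) : List Char × Int :=
  (st.1 ++ [pvSym (PySem.Int.mod st.2 3)], PySem.Int.floordiv st.2 3)

def gen_str_alt (num : Int) (bit : Int) : String × Int :=
  let rev0 : List Char := [pvSym (PySem.Int.mod num 3)]
  let rev : List Char :=
    if 2 ≤ bit then
      let st := (List.range (bit - 2).toNat).foldl pvStepB (rev0, PySem.Int.floordiv num 3)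
      st.1 ++ [pvSym st.2]
    else rev0
  let out := String.ofList rev.reverse   -- ''.join(reversed(rev))
  (out, (PySem.Str.count out "=" : Int))

-- ===== PRECONDITION & SPEC =====
def Spec_gen_str (num : Int) (bit : Int) (out : String × Int) : Prop := out = gen_str_alt num bit
instance (num : Int) (bit : Int) (out : String × Int) : Decidable (Spec_gen_str num bit out) := by unfold Spec_gen_str; infer_instance

-- ===== CLAIM (what is proved, stated in full; the proofs are below) =====
def Claim_equal_gen_str : Prop := ∀ (num : Int) (bit : Int), Dom_gen_str num bit → Spec_gen_str num bit (gen_str num bit)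

-- ===== LEMMAS AND PROOFS =====

-- high-to-low digit chars emitted by A's loop for exponents k, k-1, …, 1
def pvHl (n : Int) : Nat → List Char
  | 0 => []
  | k+1 => pvSym (n / 3^(k+1)) :: pvHl (n % 3^(k+1)) k

-- the value of A's 'num' after the loop
def pvTl (n : Int) : Nat → Int
  | 0 => n
  | k+1 => pvTl (n % 3^(k+1)) k

-- low-to-high digit chars produced by B's loop
def pvLo (n : Int) : Nat → List Char
  | 0 => []
  | k+1 => pvSym (n % 3) :: pvLo (n / 3) k

-- '"=un"[d]' hits '=' exactly when d = 0
theorem pvSym_eq_iff (d : Int) : pvSym d = '=' ↔ d = 0 := by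
  unfold pvSym; split_ifs with h1 h2 <;> simp_all

-- the shared three-way branch of A, rewritten through pvSym
theorem pvFinish (s : String) (c m : Int) :
    (if m = 0 then (s ++ "=", c + 1) else if m = 1 then (s ++ "u", c) else (s ++ "n", c))
      = (s ++ String.ofList [pvSym m], c + (if m = 0 then 1 else 0)) := by
  have h1 : ("=" : String) = String.ofList ['='] := by decide
  have h2 : ("u" : String) = String.ofList ['u'] := by decide
  have h3 : ("n" : String) = String.ofList ['n'] := by decide
  unfold pvSym; split_ifs <;> simp_all

theorem pvTl_mod3 : ∀ (k : Nat) (n : Int), pvTl n k % 3 = n % 3 := by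
  intro k
  induction k with
  | zero => intro n; rfl
  | succ k ih =>
    intro n
    show pvTl (n % 3^(k+1)) k % 3 = n % 3
    rw [ih]
    exact Int.emod_emod_of_dvd n (dvd_pow_self 3 (Nat.succ_ne_zero k))

theorem pvStepA_eq (s : String) (c n : Int) (k : Nat) :
    pvStepA (s, c, n) ((k+1 : Nat) : Int)
      = (s ++ String.ofList [pvSym (n / 3^(k+1))],
         c + (if n / 3^(k+1) = 0 then 1 else 0), n % 3^(k+1)) := by
  unfold pvStepA
  dsimp only
  rw [PySem.Int.floordiv_eq_ediv_of_pos (by positivity)]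
  simp only [Int.toNat_natCast]
  have h1 : ("=" : String) = String.ofList ['='] := by decide
  have h2 : ("u" : String) = String.ofList ['u'] := by decide
  have h3 : ("n" : String) = String.ofList ['n'] := by decide
  unfold pvSym
  split_ifs <;> simp_all [Int.emod_def]

theorem pvA_loop : ∀ (k : Nat) (s : String) (c n : Int),
    (PySem.List.pyRange (k : Int) 0 (-1)).foldl pvStepA (s, c, n)
      = (s ++ String.ofList (pvHl n k), c + ((pvHl n k).count '=' : Int), pvTl n k) := by
  intro k
  induction k with
  | zero =>
    intro s c n
    rw [PySem.List.pyRange_neg_one_eq_nil (by norm_num)]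
    simp [pvHl, pvTl]
  | succ k ih =>
    intro s c n
    rw [PySem.List.pyRange_neg_one_cons (by positivity)]
    simp only [List.foldl_cons]
    rw [show ((k+1 : Nat) : Int) - 1 = (k : Int) by push_cast; ring]
    rw [pvStepA_eq, ih]
    show _ = (s ++ String.ofList (pvSym (n / 3^(k+1)) :: pvHl (n % 3^(k+1)) k),
              c + (((pvSym (n / 3^(k+1)) :: pvHl (n % 3^(k+1)) k).count '=' : Nat) : Int),
              pvTl (n % 3^(k+1)) k)
    refine Prod.ext ?_ (Prod.ext ?_ rfl)
    · rw [String.append_assoc,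
          show (pvSym (n / 3^(k+1)) :: pvHl (n % 3^(k+1)) k)
              = [pvSym (n / 3^(k+1))] ++ pvHl (n % 3^(k+1)) k from rfl,
          String.ofList_append]
    · show c + (if n / 3^(k+1) = 0 then 1 else 0) + _ = _
      rw [List.count_cons]
      have hbeq : (pvSym (n / 3^(k+1)) == '=') = decide (n / 3^(k+1) = 0) := by
        by_cases h : n / 3^(k+1) = 0 <;> simp [h, pvSym_eq_iff]
      rw [hbeq]
      by_cases h : n / 3^(k+1) = 0
      · simp [h]; ring
      · simp [h]

theorem pvA_char (num bit : Int) :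
    gen_str num bit
      = (String.ofList (pvHl num (bit-1).toNat ++ [pvSym (num % 3)]),
         (((pvHl num (bit-1).toNat ++ [pvSym (num % 3)]).count '=' : Nat) : Int)) := by
  unfold gen_str
  have hr : PySem.List.pyRange (bit - 1) 0 (-1)
      = PySem.List.pyRange (((bit-1).toNat : Nat) : Int) 0 (-1) := by
    by_cases h : bit - 1 ≤ 0
    · rw [PySem.List.pyRange_neg_one_eq_nil h, PySem.List.pyRange_neg_one_eq_nil (by omega)]
    · rw [Int.toNat_of_nonneg (by omega)]
  rw [hr, pvA_loop]
  dsimp only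
  rw [PySem.Int.mod_eq_emod_of_pos (by norm_num), pvTl_mod3]
  rw [pvFinish]
  refine Prod.ext ?_ ?_
  · show "" ++ String.ofList _ ++ String.ofList _ = _
    rw [String.append_assoc, ← String.ofList_append]
    simp
  · show 0 + _ + (if num % 3 = 0 then 1 else 0) = _
    rw [List.count_append, List.count_cons]
    have hbeq : (pvSym (num % 3) == '=') = decide (num % 3 = 0) := by
      by_cases h : num % 3 = 0 <;> simp [h, pvSym_eq_iff]
    rw [hbeq]
    by_cases h : num % 3 = 0
    · simp [h]
    · simp [h]

theorem pvLo_snoc : ∀ (m : Nat) (n : Int),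
    pvLo n (m+1) = pvLo n m ++ [pvSym ((n / 3^m) % 3)] := by
  intro m
  induction m with
  | zero => intro n; simp [pvLo]
  | succ m ih =>
    intro n
    show pvSym (n % 3) :: pvLo (n / 3) (m+1) = (pvSym (n % 3) :: pvLo (n / 3) m) ++ _
    rw [ih]
    rw [show (n / 3) / 3^m = n / 3^(m+1) from by
      rw [Int.ediv_ediv_of_nonneg (by norm_num), ← pow_succ']]
    simp

theorem pvB_loop : ∀ (m : Nat) (r : List Char) (n : Int),
    (List.range m).foldl pvStepB (r, n) = (r ++ pvLo n m, n / 3^m) := by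
  intro m
  induction m with
  | zero => intro r n; simp [pvLo]
  | succ m ih =>
    intro r n
    rw [List.range_succ, List.foldl_append, ih]
    simp only [List.foldl_cons, List.foldl_nil]
    unfold pvStepB
    rw [PySem.Int.mod_eq_emod_of_pos (by norm_num),
        PySem.Int.floordiv_eq_ediv_of_pos (by norm_num)]
    refine Prod.ext ?_ ?_
    · show r ++ pvLo n m ++ [pvSym ((n / 3^m) % 3)] = r ++ pvLo n (m+1)
      rw [pvLo_snoc, List.append_assoc]
    · show (n / 3^m) / 3 = n / 3^(m+1)
      rw [Int.ediv_ediv_of_nonneg (by norm_num), ← pow_succ]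

theorem pvDigit (k : Nat) (n : Int) :
    (n % 3^(k+2)) / 3^(k+1) = (n / 3^(k+1)) % 3 := by
  rw [Int.emod_def n (3^(k+2))]
  rw [show n - 3^(k+2) * (n / 3^(k+2)) = n + 3^(k+1) * (-(3 * (n / 3^(k+2)))) from by ring]
  rw [Int.add_mul_ediv_left _ _ (by positivity : (3:Int)^(k+1) ≠ 0)]
  rw [show n / 3^(k+2) = (n / 3^(k+1)) / 3 from by
    rw [Int.ediv_ediv_of_nonneg (by positivity), ← pow_succ]]
  rw [Int.emod_def]
  ring

theorem pvBridge : ∀ (k : Nat) (n : Int),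
    pvHl (n % 3^(k+1)) k = (pvLo (n / 3) k).reverse := by
  intro k
  induction k with
  | zero => intro n; rfl
  | succ k ih =>
    intro n
    show pvSym ((n % 3^(k+2)) / 3^(k+1)) :: pvHl ((n % 3^(k+2)) % 3^(k+1)) k = _
    rw [pvDigit, Int.emod_emod_of_dvd n (pow_dvd_pow 3 (by omega)), ih]
    rw [pvLo_snoc]
    rw [show (n / 3) / 3^k = n / 3^(k+1) from by
      rw [Int.ediv_ediv_of_nonneg (by norm_num), ← pow_succ']]
    simp

theorem pvCount_go_single (c : Char) : ∀ (l : List Char) (fuel acc : Nat), l.length ≤ fuel →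
    PySem.Chars.count.go [c] fuel l acc = acc + l.count c := by
  intro l
  induction l with
  | nil => intro fuel acc h; cases fuel <;> simp [PySem.Chars.count.go]
  | cons hd t ih =>
    intro fuel acc h
    cases fuel with
    | zero => simp at h
    | succ f =>
      have ht : t.length ≤ f := by simpa using h
      by_cases hc : c = hd
      · subst hc
        rw [show PySem.Chars.count.go [c] (f+1) (c :: t) acc
              = PySem.Chars.count.go [c] f t (acc+1) from by
            simp [PySem.Chars.count.go, List.isPrefixOf]]
        rw [ih f (acc+1) ht, List.count_cons]
        simp
        omega
      · rw [show PySem.Chars.count.go [c] (f+1) (hd :: t) acc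
              = PySem.Chars.count.go [c] f t acc from by
            simp [PySem.Chars.count.go, List.isPrefixOf, hc]]
        rw [ih f acc ht, List.count_cons]
        simp [Ne.symm hc]

theorem pvChars_count_single (l : List Char) :
    PySem.Chars.count l ['='] = l.count '=' := by
  unfold PySem.Chars.count
  simp [pvCount_go_single '=' l l.length 0 le_rfl]

theorem pvStr_count_single (l : List Char) :
    PySem.Str.count (String.ofList l) "=" = l.count '=' := by
  have h : ("=" : String).toList = ['='] := by decide
  rw [PySem.Str.count_eq]
  simp only [h, String.toList_ofList]
  exact pvChars_count_single l

theorem pvB_char (num bit : Int) :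
    gen_str_alt num bit
      = (String.ofList (pvHl num (bit-1).toNat ++ [pvSym (num % 3)]),
         (((pvHl num (bit-1).toNat ++ [pvSym (num % 3)]).count '=' : Nat) : Int)) := by
  unfold gen_str_alt
  rw [PySem.Int.mod_eq_emod_of_pos (by norm_num),
      PySem.Int.floordiv_eq_ediv_of_pos (by norm_num)]
  by_cases hb : 2 ≤ bit
  · simp only [if_pos hb]
    rw [pvB_loop]
    have hm : (bit-1).toNat = (bit-2).toNat + 1 := by omega
    rw [hm]
    have h1 : (num / 3) / 3^(bit-2).toNat = num / 3^((bit-2).toNat + 1) := by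
      rw [Int.ediv_ediv_of_nonneg (by norm_num), ← pow_succ']
    have hL : (([pvSym (num % 3)] ++ pvLo (num / 3) (bit-2).toNat)
                ++ [pvSym ((num / 3) / 3^(bit-2).toNat)]).reverse
        = pvHl num ((bit-2).toNat + 1) ++ [pvSym (num % 3)] := by
      rw [h1]
      show _ = (pvSym (num / 3^((bit-2).toNat + 1)) :: pvHl (num % 3^((bit-2).toNat + 1)) (bit-2).toNat) ++ _
      rw [pvBridge]
      simp
    rw [hL, pvStr_count_single]
  · simp only [if_neg hb]
    have h0 : (bit-1).toNat = 0 := by omega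
    rw [h0]
    simp [pvHl, pvChars_count_single]

-- ===== VERDICT (by name: the statement is the Claim_ definition above) =====
theorem gen_str_spec : Claim_equal_gen_str := by
  intro num bit _
  unfold Spec_gen_str
  rw [pvA_char, pvB_char]
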